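-- pv_equiv track=rewrite | github.com/snowflakedb/snowflake-cli | src/snowflake/cli/_plugins/dbt/manager.py | _process_dbt_args
-- ===== SOURCE A (Python) =====
-- def _process_dbt_args(dbt_cli_args: tuple) -> str:
--     """
--     Process dbt CLI arguments, handling special cases like --vars flag.
--     """
--     if not dbt_cli_args:
--         return ""
--
--     processed_args = []
--     i = 0
--     while i < len(dbt_cli_args):
--         arg = dbt_cli_args[i]
--         if arg == "--vars" and i + 1 < len(dbt_cli_args):
--             vars_value = dbt_cli_args[i + 1]
--             processed_args.append("--vars")
--             processed_args.append(f"'{vars_value}'")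
--             i += 2
--         else:
--             processed_args.append(arg)
--             i += 1
--     return " ".join(processed_args)
-- ===== SOURCE B (Python) =====
-- def _process_dbt_args(dbt_cli_args: tuple) -> str:
--     processed_args = []
--     quote_next = False
--     for arg in dbt_cli_args:
--         if quote_next:
--             processed_args.append(f"'{arg}'")
--             quote_next = False
--         elif arg == "--vars":
--             processed_args.append("--vars")
--             quote_next = True
--         else:
--             processed_args.append(arg)
--     return " ".join(processed_args)
-- ===== Notes on version B (the rewrite author's own statement) =====
-- stated objective: idiomatic
-- what changed: Replaced the index-based while loop that consumes two elements after '--vars' with a single for loop over the args maintaining a quote_next boolean flag.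
import Mathlib
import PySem

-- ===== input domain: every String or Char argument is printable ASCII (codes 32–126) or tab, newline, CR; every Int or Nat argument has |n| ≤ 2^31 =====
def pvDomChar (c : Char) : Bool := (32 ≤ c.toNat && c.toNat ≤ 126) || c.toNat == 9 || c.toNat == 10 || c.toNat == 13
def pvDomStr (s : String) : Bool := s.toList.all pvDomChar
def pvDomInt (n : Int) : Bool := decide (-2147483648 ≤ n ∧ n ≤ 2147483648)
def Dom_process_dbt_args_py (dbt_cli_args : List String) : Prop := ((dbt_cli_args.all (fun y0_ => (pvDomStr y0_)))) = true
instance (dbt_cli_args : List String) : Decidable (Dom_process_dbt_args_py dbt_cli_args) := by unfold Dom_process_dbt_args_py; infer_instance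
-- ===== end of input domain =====

-- ===== PORT A =====
-- B replaces A's index-based two-element-consuming while loop with a single pass keeping a quote_next flag (idiomatic decomposition, same cost).
-- while loop over index i, consuming two elements when arg == "--vars" and a next element exists
def pvLoopA : List String → List String
  | [] => []
  | [arg] => [arg]
  | arg :: v :: rest =>
    if arg == "--vars" then "--vars" :: ("'" ++ v ++ "'") :: pvLoopA rest
    else arg :: pvLoopA (v :: rest)

def process_dbt_args_py (dbt_cli_args : List String) : String :=
  if dbt_cli_args.isEmpty then ""
  else PySem.Str.join " " (pvLoopA dbt_cli_args)

-- ===== PORT B =====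
-- one for-loop step: (processed_args, quote_next)
def pvStepB (st : List String × Bool) (arg : String) : List String × Bool :=
  if st.2 then (st.1 ++ ["'" ++ arg ++ "'"], false)
  else if arg == "--vars" then (st.1 ++ ["--vars"], true)
  else (st.1 ++ [arg], false)

def process_dbt_args_py_alt (dbt_cli_args : List String) : String :=
  PySem.Str.join " " (dbt_cli_args.foldl pvStepB ([], false)).1

-- ===== PRECONDITION & SPEC =====
def Spec_process_dbt_args_py (dbt_cli_args : List String) (out : String) : Prop := out = process_dbt_args_py_alt dbt_cli_args
instance (dbt_cli_args : List String) (out : String) : Decidable (Spec_process_dbt_args_py dbt_cli_args out) := by unfold Spec_process_dbt_args_py; infer_instance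

-- ===== CLAIM (what is proved, stated in full; the proofs are below) =====
def Claim_equal_process_dbt_args_py : Prop := ∀ (dbt_cli_args : List String), Dom_process_dbt_args_py dbt_cli_args → Spec_process_dbt_args_py dbt_cli_args (process_dbt_args_py dbt_cli_args)

-- ===== LEMMAS AND PROOFS =====
-- the list B's loop has produced, as a direct recursion on (flag, remaining args)
def pvGB : Bool → List String → List String
  | _, [] => []
  | true, a :: r => ("'" ++ a ++ "'") :: pvGB false r
  | false, a :: r => if a == "--vars" then "--vars" :: pvGB true r else a :: pvGB false r

theorem pvFoldB_eq (l : List String) : ∀ (acc : List String) (flag : Bool),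
    (l.foldl pvStepB (acc, flag)).1 = acc ++ pvGB flag l := by
  induction l with
  | nil => intro acc flag; simp [pvGB]
  | cons a r ih =>
    intro acc flag
    cases flag with
    | true => simp [List.foldl, pvStepB, pvGB, ih]
    | false =>
      by_cases h : a == "--vars"
      · simp [List.foldl, pvStepB, pvGB, h, ih]
      · simp [List.foldl, pvStepB, pvGB, h, ih]

theorem pvGB_eq_loopA (l : List String) : pvGB false l = pvLoopA l := by
  induction l using pvLoopA.induct with
  | case1 => rfl
  | case2 arg =>
    by_cases h : arg = "--vars"
    · subst h; rfl
    · simp [pvGB, pvLoopA, h]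
  | case3 arg v rest h ih =>
    rw [pvGB, if_pos h, pvGB, ih, pvLoopA, if_pos h]
  | case4 arg v rest h ih =>
    rw [pvGB, if_neg h, ih, pvLoopA, if_neg h]

-- ===== VERDICT (by name: the statement is the Claim_ definition above) =====
theorem process_dbt_args_py_spec : Claim_equal_process_dbt_args_py := by
  intro args _
  unfold Spec_process_dbt_args_py process_dbt_args_py process_dbt_args_py_alt
  rw [pvFoldB_eq, List.nil_append, pvGB_eq_loopA]
  cases args with
  | nil => decide
  | cons a r => simp [List.isEmpty]
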